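-- pv_equiv track=rewrite | github.com/absoluteunit1/LeetCode | 30DayChallengeApril2020/week2/PerformStringShifts_Apr14.py | shiftStrings
-- ===== SOURCE A (Python) =====
-- def shiftStrings(s, shift):
--     l = len(s)
--     for order in shift:
--         direction = order[0]
--         amount = order[1]
--         if direction == 1:
--             s_r = amount%l
--             if s_r != 0:
--                 s = s[l - s_r:l] + s[:l - s_r]
--         else:
--             s_l = amount%l
--             if s_l != 0:
--                 s = s[s_l:l] + s[:s_l]
--     return s
-- ===== SOURCE B (Python) =====
-- def shiftStrings(s, shift):
--     # Sum the signed shift amounts once, then do a single rotation.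
--     if not s:
--         return s
--     l = len(s)
--     net = 0
--     for order in shift:
--         net += order[1] if order[0] == 1 else -order[1]
--     k = net % l
--     if k == 0:
--         return s
--     return s[-k:] + s[:-k]
-- ===== Notes on version B (the rewrite author's own statement) =====
-- stated objective: faster
-- what changed: Instead of performing every rotation with two slices per order, B sums all signed shift amounts in one pass and performs a single rotation by the net amount mod len(s).
import Mathlib
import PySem

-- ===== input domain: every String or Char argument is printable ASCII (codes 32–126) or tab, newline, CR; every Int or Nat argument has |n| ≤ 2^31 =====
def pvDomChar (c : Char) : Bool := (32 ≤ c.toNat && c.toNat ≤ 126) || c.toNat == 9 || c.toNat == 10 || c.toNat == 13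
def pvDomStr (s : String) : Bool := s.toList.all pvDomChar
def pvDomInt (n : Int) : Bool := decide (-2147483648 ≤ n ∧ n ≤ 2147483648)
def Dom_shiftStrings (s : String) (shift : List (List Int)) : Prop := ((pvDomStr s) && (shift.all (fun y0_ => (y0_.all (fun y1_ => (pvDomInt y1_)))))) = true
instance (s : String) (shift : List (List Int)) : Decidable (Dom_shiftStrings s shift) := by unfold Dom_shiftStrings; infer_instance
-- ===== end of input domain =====

-- B replaces A's per-order pair of slices by one pass summing the signed shift amounts
-- followed by a single rotation: asymptotically faster (O(k+l) vs O(k*l)).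

-- ===== PORT A =====
-- A rebinds s each iteration; l is len(s) computed once (rotations preserve it).
def shiftStrings (s : String) (shift : List (List Int)) : String :=
  let l : Int := (s.toList.length : Int)
  String.ofList (shift.foldl (fun cur order =>
    let direction := PySem.List.pyGetD order 0 0
    let amount := PySem.List.pyGetD order 1 0
    if direction = 1 then
      let s_r := PySem.Int.mod amount l
      if s_r ≠ 0 then
        PySem.List.slice cur (some (l - s_r)) (some l) ++ PySem.List.slice cur none (some (l - s_r))
      else cur
    else
      let s_l := PySem.Int.mod amount l
      if s_l ≠ 0 then
        PySem.List.slice cur (some s_l) (some l) ++ PySem.List.slice cur none (some s_l)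
      else cur) s.toList)

-- ===== PORT B =====
def shiftStrings_alt (s : String) (shift : List (List Int)) : String :=
  if s.toList = [] then s
  else
    let l : Int := (s.toList.length : Int)
    let net : Int := shift.foldl (fun acc order =>
      if PySem.List.pyGetD order 0 0 = 1 then acc + PySem.List.pyGetD order 1 0
      else acc - PySem.List.pyGetD order 1 0) 0
    let k := PySem.Int.mod net l
    if k = 0 then s
    else String.ofList (PySem.List.slice s.toList (some (-k)) none ++ PySem.List.slice s.toList none (some (-k)))

-- ===== PRECONDITION & SPEC =====
-- Pre_ excludes exactly the inputs where Python A raises: an empty string with a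
-- non-empty shift list (ZeroDivisionError from amount % 0, or IndexError first if the
-- order is short), and any order list with fewer than 2 entries (IndexError).
def Pre_shiftStrings (s : String) (shift : List (List Int)) : Prop :=
  (shift = [] ∨ s ≠ "") ∧ ∀ o ∈ shift, 2 ≤ o.length
instance (s : String) (shift : List (List Int)) : Decidable (Pre_shiftStrings s shift) := by
  unfold Pre_shiftStrings; infer_instance
def pvWitness_shiftStrings : String × List (List Int) := ("abcde", [[0, 2], [1, 7], [1, -3]])

def Spec_shiftStrings (s : String) (shift : List (List Int)) (out : String) : Prop := out = shiftStrings_alt s shift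
instance (s : String) (shift : List (List Int)) (out : String) : Decidable (Spec_shiftStrings s shift out) := by unfold Spec_shiftStrings; infer_instance

-- ===== CLAIM (what is proved, stated in full; the proofs are below) =====
def Claim_equal_shiftStrings : Prop := ∀ (s : String) (shift : List (List Int)), Dom_shiftStrings s shift → Pre_shiftStrings s shift → Spec_shiftStrings s shift (shiftStrings s shift)
-- ===== LEMMAS AND PROOFS =====

-- The signed left-rotation amount an order contributes in A's traversal.
def pvSigned (order : List Int) : Int :=
  if PySem.List.pyGetD order 0 0 = 1 then -(PySem.List.pyGetD order 1 0) else PySem.List.pyGetD order 1 0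

def pvSum (shift : List (List Int)) : Int := (shift.map pvSigned).sum

-- A's step function (the lambda in shiftStrings's foldl), named for the proofs.
def pvStepA (l : Int) (cur : List Char) (order : List Int) : List Char :=
  let direction := PySem.List.pyGetD order 0 0
  let amount := PySem.List.pyGetD order 1 0
  if direction = 1 then
    let s_r := PySem.Int.mod amount l
    if s_r ≠ 0 then
      PySem.List.slice cur (some (l - s_r)) (some l) ++ PySem.List.slice cur none (some (l - s_r))
    else cur
  else
    let s_l := PySem.Int.mod amount l
    if s_l ≠ 0 then
      PySem.List.slice cur (some s_l) (some l) ++ PySem.List.slice cur none (some s_l)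
    else cur

theorem pvNegEmod (a n : Int) (hn : 0 < n) : (-a) % n = if a % n = 0 then 0 else n - a % n := by
  have hd : n ∣ a ↔ a % n = 0 := ⟨Int.emod_eq_zero_of_dvd, Int.dvd_of_emod_eq_zero⟩
  have hna : (n.natAbs : Int) = n := Int.natAbs_of_nonneg (le_of_lt hn)
  rw [Int.neg_emod, hna]
  by_cases h : a % n = 0 <;> simp [hd, h]

theorem pvAddModNat (x y : Int) (L : Nat) (hL : 0 < L) :
    ((x % L).toNat + (y % L).toNat) % L = ((x + y) % (L:Int)).toNat % L := by
  have hn : (0:Int) < (L:Int) := by exact_mod_cast hL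
  have h1 : 0 ≤ x % L := Int.emod_nonneg x (by omega)
  have h3 : 0 ≤ y % L := Int.emod_nonneg y (by omega)
  have h5 : 0 ≤ (x + y) % (L:Int) := Int.emod_nonneg (x+y) (by omega)
  have : (((x % L).toNat + (y % L).toNat) % L : Int) = (((x + y) % (L:Int)).toNat % L : Int) := by
    push_cast [Int.toNat_of_nonneg h1, Int.toNat_of_nonneg h3, Int.toNat_of_nonneg h5]
    conv_rhs => rw [Int.emod_emod_of_dvd (x+y) dvd_rfl]
    exact (Int.add_emod x y L).symm
  exact_mod_cast this

-- drop m ++ take m with 0 ≤ m ≤ n is rotation; the two slices of a length-n list are drop/take.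
theorem pvSliceRot (cs : List Char) (m : Int) (hm0 : 0 ≤ m) (hml : m ≤ (cs.length : Int)) :
    PySem.List.slice cs (some m) (some (cs.length : Int)) ++ PySem.List.slice cs none (some m)
      = cs.rotate m.toNat := by
  rw [PySem.List.slice_toNat cs hm0 (by positivity), PySem.List.slice_to cs hm0,
      List.rotate_eq_drop_append_take (by omega)]
  congr 1
  have : (cs.drop m.toNat).length = cs.length - m.toNat := List.length_drop ..
  rw [List.take_of_length_le (by omega)]

theorem pvStepA_rotate (cs : List Char) (o : List Int) (hne : cs ≠ []) :
    pvStepA (cs.length : Int) cs o = cs.rotate ((PySem.Int.mod (pvSigned o) (cs.length : Int)).toNat) := by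
  have hl : (0:Int) < (cs.length : Int) := by
    have := List.length_pos_iff.mpr hne; exact_mod_cast this
  set n : Int := (cs.length : Int) with hn
  unfold pvStepA pvSigned
  set a := PySem.List.pyGetD o 1 0 with ha
  have hmod : PySem.Int.mod a n = a % n := PySem.Int.mod_eq_emod_of_pos hl
  have hmodn : PySem.Int.mod (-a) n = (-a) % n := PySem.Int.mod_eq_emod_of_pos hl
  have h1 : 0 ≤ a % n := Int.emod_nonneg a (by omega)
  have h2 : a % n < n := Int.emod_lt_of_pos a hl
  by_cases hd : PySem.List.pyGetD o 0 0 = 1 <;> simp only [hd, if_pos, if_false]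
  · -- right shift by a = left rotation by n - a % n (or no-op)
    by_cases hz : PySem.Int.mod a n = 0
    · rw [if_neg (by simp [hz]), hmodn, pvNegEmod a n hl, if_pos (hmod ▸ hz)]
      simp
    · have hz' : a % n ≠ 0 := hmod ▸ hz
      rw [if_pos hz, hmodn, pvNegEmod a n hl, if_neg hz', hmod]
      exact pvSliceRot cs (n - a % n) (by omega) (by omega)
  · by_cases hz : PySem.Int.mod a n = 0
    · rw [if_neg (by simp [hz]), hz]; simp
    · rw [if_pos hz, hmod]
      exact pvSliceRot cs (a % n) h1 (by omega)

theorem pvFoldA_rotate (shift : List (List Int)) (cs : List Char) (hne : cs ≠ []) :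
    shift.foldl (pvStepA (cs.length : Int)) cs
      = cs.rotate ((PySem.Int.mod (pvSum shift) (cs.length : Int)).toNat) := by
  induction shift generalizing cs with
  | nil =>
    have hl : (0:Int) < (cs.length : Int) := by
      have := List.length_pos_iff.mpr hne; exact_mod_cast this
    simp [pvSum, PySem.Int.mod_eq_emod_of_pos hl]
  | cons o rest ih =>
    have hL : 0 < cs.length := List.length_pos_iff.mpr hne
    have hl : (0:Int) < (cs.length : Int) := by exact_mod_cast hL
    rw [List.foldl_cons, pvStepA_rotate cs o hne]
    set k0 : Nat := (PySem.Int.mod (pvSigned o) (cs.length : Int)).toNat with hk0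
    have hlen : (cs.rotate k0).length = cs.length := List.length_rotate ..
    have hne' : cs.rotate k0 ≠ [] := by
      rw [← List.length_pos_iff, hlen]; exact hL
    have hih := ih (cs.rotate k0) hne'
    rw [hlen] at hih
    rw [hih, List.rotate_rotate]
    rw [← List.rotate_mod, ← List.rotate_mod cs ((PySem.Int.mod (pvSum (o :: rest)) (cs.length : Int)).toNat)]
    congr 1
    have hm : ∀ x : Int, PySem.Int.mod x (cs.length : Int) = x % (cs.length : Int) :=
      fun x => PySem.Int.mod_eq_emod_of_pos hl
    have hsum : pvSum (o :: rest) = pvSigned o + pvSum rest := by simp [pvSum]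
    rw [hsum, hk0, hm, hm, hm]
    exact pvAddModNat (pvSigned o) (pvSum rest) cs.length hL

theorem pvNet_eq (shift : List (List Int)) (acc : Int) :
    shift.foldl (fun acc order =>
      if PySem.List.pyGetD order 0 0 = 1 then acc + PySem.List.pyGetD order 1 0
      else acc - PySem.List.pyGetD order 1 0) acc = acc - pvSum shift := by
  induction shift generalizing acc with
  | nil => simp [pvSum]
  | cons o rest ih =>
    rw [List.foldl_cons, ih]
    have hsum : pvSum (o :: rest) = pvSigned o + pvSum rest := by simp [pvSum]
    rw [hsum]
    unfold pvSigned
    by_cases hd : PySem.List.pyGetD o 0 0 = 1 <;> simp [hd] <;> ring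

-- ===== VERDICT (by name: the statement is the Claim_ definition above) =====
theorem shiftStrings_spec : Claim_equal_shiftStrings := by
  intro s shift _ hpre
  unfold Spec_shiftStrings shiftStrings shiftStrings_alt
  by_cases hcs : s.toList = []
  · -- empty string: Pre forces shift = []
    have hs : s = "" := by
      have := congrArg String.ofList hcs
      simpa using this
    have hshift : shift = [] := by
      rcases hpre.1 with h | h
      · exact h
      · exact absurd hs h
    subst hshift
    simp [hcs]
    exact hs
  · have hL : 0 < s.toList.length := List.length_pos_iff.mpr hcs
    have hl : (0:Int) < (s.toList.length : Int) := by exact_mod_cast hL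
    have hstep : (fun (cur : List Char) (order : List Int) =>
        let direction := PySem.List.pyGetD order 0 0
        let amount := PySem.List.pyGetD order 1 0
        if direction = 1 then
          let s_r := PySem.Int.mod amount (s.toList.length : Int)
          if s_r ≠ 0 then
            PySem.List.slice cur (some ((s.toList.length : Int) - s_r)) (some (s.toList.length : Int)) ++ PySem.List.slice cur none (some ((s.toList.length : Int) - s_r))
          else cur
        else
          let s_l := PySem.Int.mod amount (s.toList.length : Int)
          if s_l ≠ 0 then
            PySem.List.slice cur (some s_l) (some (s.toList.length : Int)) ++ PySem.List.slice cur none (some s_l)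
          else cur) = pvStepA (s.toList.length : Int) := by
      funext cur order; rfl
    simp only [hstep, if_neg hcs]
    rw [pvFoldA_rotate shift s.toList hcs, pvNet_eq, zero_sub]
    set n : Int := (s.toList.length : Int) with hn
    have hm : ∀ x : Int, PySem.Int.mod x n = x % n := fun x => PySem.Int.mod_eq_emod_of_pos hl
    set x : Int := pvSum shift with hx
    have h1 : 0 ≤ (-x) % n := Int.emod_nonneg (-x) (by omega)
    have h2 : (-x) % n < n := Int.emod_lt_of_pos (-x) hl
    have h3 : 0 ≤ x % n := Int.emod_nonneg x (by omega)
    have h4 : x % n < n := Int.emod_lt_of_pos x hl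
    have hneg : (-x) % n = if x % n = 0 then 0 else n - x % n := pvNegEmod x n hl
    by_cases hz : PySem.Int.mod (-x) n = 0
    · rw [if_pos hz]
      rw [hm] at hz
      have hx0 : x % n = 0 := by
        by_cases h : x % n = 0
        · exact h
        · rw [if_neg h] at hneg; omega
      rw [hm, hx0]
      simp
    · rw [if_neg hz, hm] at *
      have hz' : (-x) % n ≠ 0 := hz
      have hx0 : x % n ≠ 0 := by
        intro h; rw [if_pos h] at hneg; exact hz' hneg
      rw [if_neg hx0] at hneg
      set K : Nat := ((-x) % n).toNat with hK
      have hKpos : 0 < K := by omega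
      have hKcast : -((-x) % n) = -((K : Int)) := by omega
      rw [hm, hKcast,
          PySem.List.slice_from_neg_natCast s.toList K hKpos,
          PySem.List.slice_to_neg_natCast s.toList K hKpos,
          ← List.rotate_eq_drop_append_take (by omega)]
      congr 2
      omega
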